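-- pv_equiv track=rewrite | github.com/suv0/VidSafe---Local-Video-Redaction-CLI | facebook_compliance.py | _get_cluster_bbox
-- ===== SOURCE A (Python) =====
-- from typing import Tuple, List, Dict
-- from typing import Tuple, List, Dict
--
-- def _get_cluster_bbox(cluster, frame_shape) -> Tuple[int, int, int, int]:
--     """Get bounding box for a cluster of lines."""
--     all_points = []
--     for line in cluster:
--         x1, y1, x2, y2 = line
--         all_points.extend([(x1, y1), (x2, y2)])
--
--     if not all_points:
--         return (0, 0, 0, 0)
--
--     xs, ys = zip(*all_points)
--
--     margin = 20
--     x1 = max(0, min(xs) - margin)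
--     y1 = max(0, min(ys) - margin)
--     x2 = min(frame_shape[1], max(xs) + margin)
--     y2 = min(frame_shape[0], max(ys) + margin)
--
--     return (x1, y1, x2, y2)
-- ===== SOURCE B (Python) =====
-- def _get_cluster_bbox(cluster, frame_shape):
--     """Get bounding box for a cluster of lines (single-pass extrema)."""
--     box = None
--     for line in cluster:
--         x1, y1, x2, y2 = line
--         for x, y in ((x1, y1), (x2, y2)):
--             if box is None:
--                 box = (x, y, x, y)
--             else:
--                 a, b, c, d = box
--                 box = (min(a, x), min(b, y), max(c, x), max(d, y))
--
--     if box is None: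
--         return (0, 0, 0, 0)
--
--     a, b, c, d = box
--     margin = 20
--     return (max(0, a - margin),
--             max(0, b - margin),
--             min(frame_shape[1], c + margin),
--             min(frame_shape[0], d + margin))
-- ===== Notes on version B (the rewrite author's own statement) =====
-- stated objective: simpler
-- what changed: Replaces the materialised all_points list plus zip and four separate min/max scans with a single pass over the lines maintaining the four running extrema in one optional accumulator.
import Mathlib
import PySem

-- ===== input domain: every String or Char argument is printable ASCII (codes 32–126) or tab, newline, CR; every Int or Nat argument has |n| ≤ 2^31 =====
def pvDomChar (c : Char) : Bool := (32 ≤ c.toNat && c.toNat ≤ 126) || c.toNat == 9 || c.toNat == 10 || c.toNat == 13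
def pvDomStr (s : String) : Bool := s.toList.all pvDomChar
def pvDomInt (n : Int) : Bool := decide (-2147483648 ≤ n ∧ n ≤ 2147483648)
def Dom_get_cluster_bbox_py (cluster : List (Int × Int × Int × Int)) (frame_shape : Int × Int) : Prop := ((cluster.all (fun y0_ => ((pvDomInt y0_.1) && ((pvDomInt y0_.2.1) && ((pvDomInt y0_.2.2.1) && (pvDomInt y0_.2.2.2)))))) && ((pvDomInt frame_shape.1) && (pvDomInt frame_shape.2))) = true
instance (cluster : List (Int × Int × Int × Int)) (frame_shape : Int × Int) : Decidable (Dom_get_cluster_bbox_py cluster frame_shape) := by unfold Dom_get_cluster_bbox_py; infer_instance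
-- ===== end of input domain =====

-- ===== PORT A =====
-- Port of A: build all_points, then min/max of the x and y projections with margin/clamping.
def get_cluster_bbox_py (cluster : List (Int × Int × Int × Int)) (frame_shape : Int × Int) : Int × Int × Int × Int :=
  let all_points : List (Int × Int) :=
    cluster.foldl (fun acc line => acc ++ [(line.1, line.2.1), (line.2.2.1, line.2.2.2)]) []
  match all_points with
  | [] => (0, 0, 0, 0)
  | p :: ps =>
    let xs := (p :: ps).map Prod.fst
    let ys := (p :: ps).map Prod.snd
    let margin : Int := 20
    let x1 := max 0 ((xs.min?.getD 0) - margin)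
    let y1 := max 0 ((ys.min?.getD 0) - margin)
    let x2 := min frame_shape.2 ((xs.max?.getD 0) + margin)
    let y2 := min frame_shape.1 ((ys.max?.getD 0) + margin)
    (x1, y1, x2, y2)

-- ===== PORT B =====
-- B helper: fold one endpoint into the optional running-extrema box.
def bboxStep (st : Option (Int × Int × Int × Int)) (p : Int × Int) : Option (Int × Int × Int × Int) :=
  match st with
  | none => some (p.1, p.2, p.1, p.2)
  | some (a, b, c, d) => some (min a p.1, min b p.2, max c p.1, max d p.2)

-- Port of B: single pass maintaining the four running extrema.
def get_cluster_bbox_py_alt (cluster : List (Int × Int × Int × Int)) (frame_shape : Int × Int) : Int × Int × Int × Int :=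
  let box := cluster.foldl
    (fun st line => bboxStep (bboxStep st (line.1, line.2.1)) (line.2.2.1, line.2.2.2)) none
  match box with
  | none => (0, 0, 0, 0)
  | some (a, b, c, d) =>
    let margin : Int := 20
    (max 0 (a - margin), max 0 (b - margin),
     min frame_shape.2 (c + margin), min frame_shape.1 (d + margin))

-- ===== PRECONDITION & SPEC =====
def Spec_get_cluster_bbox_py (cluster : List (Int × Int × Int × Int)) (frame_shape : Int × Int) (out : Int × Int × Int × Int) : Prop := out = get_cluster_bbox_py_alt cluster frame_shape
instance (cluster : List (Int × Int × Int × Int)) (frame_shape : Int × Int) (out : Int × Int × Int × Int) : Decidable (Spec_get_cluster_bbox_py cluster frame_shape out) := by unfold Spec_get_cluster_bbox_py; infer_instance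

-- ===== CLAIM (what is proved, stated in full; the proofs are below) =====
def Claim_equal_get_cluster_bbox_py : Prop := ∀ (cluster : List (Int × Int × Int × Int)) (frame_shape : Int × Int), Dom_get_cluster_bbox_py cluster frame_shape → Spec_get_cluster_bbox_py cluster frame_shape (get_cluster_bbox_py cluster frame_shape)

-- ===== LEMMAS AND PROOFS =====

def pvLinePts (line : Int × Int × Int × Int) : List (Int × Int) :=
  [(line.1, line.2.1), (line.2.2.1, line.2.2.2)]

lemma foldl_min_min (l : List Int) (a b : Int) :
    l.foldl min (min a b) = min a (l.foldl min b) := by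
  induction l generalizing b with
  | nil => rfl
  | cons x t ih => simp only [List.foldl_cons, min_assoc, ih]

lemma foldl_max_max (l : List Int) (a b : Int) :
    l.foldl max (max a b) = max a (l.foldl max b) := by
  induction l generalizing b with
  | nil => rfl
  | cons x t ih => simp only [List.foldl_cons, max_assoc, ih]

lemma min?_elim_foldl (l : List Int) (a : Int) :
    l.min?.elim a (min a) = l.foldl min a := by
  cases l with
  | nil => rfl
  | cons x t =>
    rw [List.min?_cons', List.foldl_cons, foldl_min_min]
    rfl

lemma max?_elim_foldl (l : List Int) (a : Int) :
    l.max?.elim a (max a) = l.foldl max a := by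
  cases l with
  | nil => rfl
  | cons x t =>
    rw [List.max?_cons', List.foldl_cons, foldl_max_max]
    rfl

lemma allPoints_eq_flatMap (cluster : List (Int × Int × Int × Int)) (acc : List (Int × Int)) :
    cluster.foldl (fun acc line => acc ++ [(line.1, line.2.1), (line.2.2.1, line.2.2.2)]) acc
    = acc ++ cluster.flatMap pvLinePts := by
  exact PySem.List.foldl_append_eq_flatMap (g := pvLinePts) (l := cluster) (acc := acc)

lemma foldB_eq_foldl_flatMap (cluster : List (Int × Int × Int × Int))
    (st : Option (Int × Int × Int × Int)) :
    cluster.foldl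
      (fun st line => bboxStep (bboxStep st (line.1, line.2.1)) (line.2.2.1, line.2.2.2)) st
    = (cluster.flatMap pvLinePts).foldl bboxStep st := by
  induction cluster generalizing st with
  | nil => rfl
  | cons l t ih => simp [pvLinePts, ih]

lemma foldl_bboxStep_some (ps : List (Int × Int)) (a b c d : Int) :
    ps.foldl bboxStep (some (a, b, c, d))
    = some ((ps.map Prod.fst).foldl min a, (ps.map Prod.snd).foldl min b,
            (ps.map Prod.fst).foldl max c, (ps.map Prod.snd).foldl max d) := by
  induction ps generalizing a b c d with
  | nil => rfl
  | cons p t ih => simp [bboxStep, ih]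

-- ===== VERDICT (by name: the statement is the Claim_ definition above) =====
theorem get_cluster_bbox_py_spec : Claim_equal_get_cluster_bbox_py := by
  intro cluster fs _
  unfold Spec_get_cluster_bbox_py get_cluster_bbox_py get_cluster_bbox_py_alt
  rw [allPoints_eq_flatMap, foldB_eq_foldl_flatMap]
  simp only [List.nil_append]
  cases h : cluster.flatMap pvLinePts with
  | nil => rfl
  | cons p ps =>
    obtain ⟨px, py⟩ := p
    simp [bboxStep, foldl_bboxStep_some, min?_elim_foldl, max?_elim_foldl]
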